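-- pv_equiv track=rewrite | github.com/pgcbioinfo/rapyds | rapyds.py | restriction_sites
-- ===== SOURCE A (Python) =====
-- def restriction_sites(enzyme_part, list_enzymes):
-- 	"""
-- 		function that parses the restriction site. Gets the RE site given the RE's name and replaces any wildcard base.
-- 		Returns RE sites p5 and p3 in regex format
-- 	"""
--
-- 	## replace wildcard bases
-- 	if any(base in "NMRWYSKHBVD" for base in enzyme_part):
-- 		enzyme_part = enzyme_part.replace("M", "[CA]")
-- 		enzyme_part = enzyme_part.replace("R", "[GA]")
-- 		enzyme_part = enzyme_part.replace("W", "[AT]")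
-- 		enzyme_part = enzyme_part.replace("Y", "[CT]")
-- 		enzyme_part = enzyme_part.replace("S", "[GC]")
-- 		enzyme_part = enzyme_part.replace("K", "[GT]")
-- 		enzyme_part = enzyme_part.replace("H", "[CAT]")
-- 		enzyme_part = enzyme_part.replace("B", "[GCT]")
-- 		enzyme_part = enzyme_part.replace("V", "[GCA]")
-- 		enzyme_part = enzyme_part.replace("D", "[GAT]")
-- 		enzyme_part = enzyme_part.replace("N", "[GCAT]")
--
-- 	return enzyme_part
-- ===== SOURCE B (Python) =====
-- _WILDCARDS = {'M': '[CA]', 'R': '[GA]', 'W': '[AT]', 'Y': '[CT]', 'S': '[GC]',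
--               'K': '[GT]', 'H': '[CAT]', 'B': '[GCT]', 'V': '[GCA]',
--               'D': '[GAT]', 'N': '[GCAT]'}
--
--
-- def restriction_sites(enzyme_part, list_enzymes):
--     return "".join(_WILDCARDS.get(c, c) for c in enzyme_part)
-- ===== Notes on version B (the rewrite author's own statement) =====
-- stated objective: idiomatic
-- what changed: Replaced the any-guard plus eleven sequential str.replace scans with a single per-character pass that joins each character's regex class looked up in one wildcard dict.
import Mathlib
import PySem

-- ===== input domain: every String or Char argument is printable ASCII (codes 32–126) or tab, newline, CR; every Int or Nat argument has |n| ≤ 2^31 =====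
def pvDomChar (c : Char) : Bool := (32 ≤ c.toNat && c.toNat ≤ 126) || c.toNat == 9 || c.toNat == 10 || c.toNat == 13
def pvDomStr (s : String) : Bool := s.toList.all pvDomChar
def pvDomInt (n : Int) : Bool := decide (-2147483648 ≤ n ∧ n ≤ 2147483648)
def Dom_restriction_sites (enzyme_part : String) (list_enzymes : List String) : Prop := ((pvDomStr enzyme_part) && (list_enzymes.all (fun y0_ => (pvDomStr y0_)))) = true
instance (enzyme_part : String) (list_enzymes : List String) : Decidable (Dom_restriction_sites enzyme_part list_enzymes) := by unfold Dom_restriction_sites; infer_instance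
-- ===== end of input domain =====

-- B replaces A's any-guard plus eleven sequential str.replace scans by one per-character
-- pass joining dict-looked-up regex classes (idiomatic, single traversal).


-- ===== PORT A =====
def restriction_sites (enzyme_part : String) (list_enzymes : List String) : String :=
  let _ := list_enzymes
  if enzyme_part.toList.any (fun base => PySem.Str.isIn (String.ofList [base]) "NMRWYSKHBVD") then
    let e := PySem.Str.replace enzyme_part "M" "[CA]"
    let e := PySem.Str.replace e "R" "[GA]"
    let e := PySem.Str.replace e "W" "[AT]"
    let e := PySem.Str.replace e "Y" "[CT]"
    let e := PySem.Str.replace e "S" "[GC]"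
    let e := PySem.Str.replace e "K" "[GT]"
    let e := PySem.Str.replace e "H" "[CAT]"
    let e := PySem.Str.replace e "B" "[GCT]"
    let e := PySem.Str.replace e "V" "[GCA]"
    let e := PySem.Str.replace e "D" "[GAT]"
    let e := PySem.Str.replace e "N" "[GCAT]"
    e
  else enzyme_part

-- ===== PORT B =====
def pvWildcards : PySem.Dict Char String :=
  PySem.Dict.ofList [('M', "[CA]"), ('R', "[GA]"), ('W', "[AT]"), ('Y', "[CT]"),
    ('S', "[GC]"), ('K', "[GT]"), ('H', "[CAT]"), ('B', "[GCT]"), ('V', "[GCA]"),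
    ('D', "[GAT]"), ('N', "[GCAT]")]

def restriction_sites_alt (enzyme_part : String) (list_enzymes : List String) : String :=
  let _ := list_enzymes
  PySem.Str.join "" (enzyme_part.toList.map (fun c => pvWildcards.getD c (String.ofList [c])))

-- ===== PRECONDITION & SPEC =====
def Spec_restriction_sites (enzyme_part : String) (list_enzymes : List String) (out : String) : Prop := out = restriction_sites_alt enzyme_part list_enzymes
instance (enzyme_part : String) (list_enzymes : List String) (out : String) : Decidable (Spec_restriction_sites enzyme_part list_enzymes out) := by unfold Spec_restriction_sites; infer_instance

-- ===== CLAIM (what is proved, stated in full; the proofs are below) =====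
def Claim_equal_restriction_sites : Prop := ∀ (enzyme_part : String) (list_enzymes : List String), Dom_restriction_sites enzyme_part list_enzymes → Spec_restriction_sites enzyme_part list_enzymes (restriction_sites enzyme_part list_enzymes)

-- ===== LEMMAS AND PROOFS =====

/-- Per-character expansion realised by B's dict lookup (and, per character, by A's chain). -/
def pvMapc (c : Char) : List Char :=
  if c = 'M' then "[CA]".toList else if c = 'R' then "[GA]".toList
  else if c = 'W' then "[AT]".toList else if c = 'Y' then "[CT]".toList
  else if c = 'S' then "[GC]".toList else if c = 'K' then "[GT]".toList
  else if c = 'H' then "[CAT]".toList else if c = 'B' then "[GCT]".toList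
  else if c = 'V' then "[GCA]".toList else if c = 'D' then "[GAT]".toList
  else if c = 'N' then "[GCAT]".toList else [c]

theorem go_single (c : Char) (new : List Char) :
    ∀ (l acc : List Char), PySem.Chars.replace.go [c] new l.length l acc
      = acc.reverse ++ l.flatMap (fun x => if x = c then new else [x])
  | [], acc => by simp [PySem.Chars.replace.go]
  | a :: t, acc => by
    simp only [List.length_cons, PySem.Chars.replace.go, List.isPrefixOf, Bool.and_true]
    by_cases h : a = c
    · subst h
      rw [if_pos (by simp)]
      simp only [List.drop_succ_cons, List.length_nil, List.drop_zero]
      rw [go_single a new t]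
      simp [List.flatMap_cons]
    · rw [if_neg (by simp [Ne.symm h])]
      rw [go_single c new t (a :: acc)]
      simp [List.flatMap_cons, h]

theorem replace_single (c : Char) (new : List Char) (s : List Char) :
    PySem.Chars.replace s [c] new = s.flatMap (fun x => if x = c then new else [x]) := by
  simp [PySem.Chars.replace, go_single]

theorem join_empty_sep (xs : List (List Char)) :
    PySem.Chars.join [] xs = xs.flatten := by
  match xs with
  | [] => simp [PySem.Chars.join_nil]
  | [x] => simp [PySem.Chars.join_singleton]
  | x :: y :: r =>
    rw [PySem.Chars.join_cons_cons, join_empty_sep (y :: r)]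
    simp

theorem alt_toList (e : String) (l : List String) :
    (restriction_sites_alt e l).toList = e.toList.flatMap pvMapc := by
  rw [restriction_sites_alt]
  rw [PySem.Str.toList_join, show ("" : String).toList = ([] : List Char) from rfl, join_empty_sep]
  rw [List.flatten_eq_flatMap, List.map_map, List.flatMap_map]
  apply List.flatMap_congr
  intro c _
  simp only [Function.comp]
  by_cases h1 : c = 'M'; · subst h1; decide
  by_cases h2 : c = 'R'; · subst h2; decide
  by_cases h3 : c = 'W'; · subst h3; decide
  by_cases h4 : c = 'Y'; · subst h4; decide
  by_cases h5 : c = 'S'; · subst h5; decide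
  by_cases h6 : c = 'K'; · subst h6; decide
  by_cases h7 : c = 'H'; · subst h7; decide
  by_cases h8 : c = 'B'; · subst h8; decide
  by_cases h9 : c = 'V'; · subst h9; decide
  by_cases h10 : c = 'D'; · subst h10; decide
  by_cases h11 : c = 'N'; · subst h11; decide
  simp [pvMapc, h1, h2, h3, h4, h5, h6, h7, h8, h9, h10, h11, pvWildcards,
    PySem.Dict.getD, PySem.Dict.ofList, PySem.Dict.update, PySem.Dict.empty,
    PySem.Dict.insert, PySem.Dict.get?, PySem.Dict.get?_mk_cons, beq_iff_eq,
    Ne.symm h1, Ne.symm h2, Ne.symm h3, Ne.symm h4, Ne.symm h5,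
    Ne.symm h6, Ne.symm h7, Ne.symm h8, Ne.symm h9, Ne.symm h10, Ne.symm h11]

/-- A character of the source that is not a wildcard is mapped to itself. -/
theorem pvMapc_of_not_wild (c : Char)
    (h : PySem.Str.isIn (String.ofList [c]) "NMRWYSKHBVD" = false) :
    pvMapc c = [c] := by
  have h1 : c ≠ 'M' := by rintro rfl; exact absurd h (by decide)
  have h2 : c ≠ 'R' := by rintro rfl; exact absurd h (by decide)
  have h3 : c ≠ 'W' := by rintro rfl; exact absurd h (by decide)
  have h4 : c ≠ 'Y' := by rintro rfl; exact absurd h (by decide)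
  have h5 : c ≠ 'S' := by rintro rfl; exact absurd h (by decide)
  have h6 : c ≠ 'K' := by rintro rfl; exact absurd h (by decide)
  have h7 : c ≠ 'H' := by rintro rfl; exact absurd h (by decide)
  have h8 : c ≠ 'B' := by rintro rfl; exact absurd h (by decide)
  have h9 : c ≠ 'V' := by rintro rfl; exact absurd h (by decide)
  have h10 : c ≠ 'D' := by rintro rfl; exact absurd h (by decide)
  have h11 : c ≠ 'N' := by rintro rfl; exact absurd h (by decide)
  simp [pvMapc, h1, h2, h3, h4, h5, h6, h7, h8, h9, h10, h11]

theorem main_eq (e : String) (l : List String) :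
    restriction_sites e l = restriction_sites_alt e l := by
  rw [← String.toList_inj, alt_toList]
  rw [restriction_sites]
  cases hg : e.toList.any (fun base => PySem.Str.isIn (String.ofList [base]) "NMRWYSKHBVD") with
  | true =>
    rw [if_pos rfl]
    simp only [PySem.Str.toList_replace]
    rw [show ("M" : String).toList = ['M'] from rfl, show ("R" : String).toList = ['R'] from rfl,
        show ("W" : String).toList = ['W'] from rfl, show ("Y" : String).toList = ['Y'] from rfl,
        show ("S" : String).toList = ['S'] from rfl, show ("K" : String).toList = ['K'] from rfl,
        show ("H" : String).toList = ['H'] from rfl, show ("B" : String).toList = ['B'] from rfl,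
        show ("V" : String).toList = ['V'] from rfl, show ("D" : String).toList = ['D'] from rfl,
        show ("N" : String).toList = ['N'] from rfl]
    simp only [replace_single, List.flatMap_assoc]
    apply List.flatMap_congr
    intro c _
    by_cases h1 : c = 'M'; · subst h1; decide
    by_cases h2 : c = 'R'; · subst h2; decide
    by_cases h3 : c = 'W'; · subst h3; decide
    by_cases h4 : c = 'Y'; · subst h4; decide
    by_cases h5 : c = 'S'; · subst h5; decide
    by_cases h6 : c = 'K'; · subst h6; decide
    by_cases h7 : c = 'H'; · subst h7; decide
    by_cases h8 : c = 'B'; · subst h8; decide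
    by_cases h9 : c = 'V'; · subst h9; decide
    by_cases h10 : c = 'D'; · subst h10; decide
    by_cases h11 : c = 'N'; · subst h11; decide
    simp [pvMapc, h1, h2, h3, h4, h5, h6, h7, h8, h9, h10, h11]
  | false =>
    rw [if_neg (by simp)]
    rw [List.any_eq_false] at hg
    conv_lhs => rw [← List.flatMap_singleton' e.toList]
    apply List.flatMap_congr
    intro c hc
    exact (pvMapc_of_not_wild c (by simpa using hg c hc)).symm

-- ===== VERDICT (by name: the statement is the Claim_ definition above) =====
theorem restriction_sites_spec : Claim_equal_restriction_sites := by
  intro e l _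
  unfold Spec_restriction_sites
  exact main_eq e l
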